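-- pv_equiv track=rewrite | github.com/dpappas/pytorch_pacrr_and_posit_drmm | COVID/COVID_SYNERGY_TASK/retrieve_docs.py | keep_only_longest
-- ===== SOURCE A (Python) =====
-- def keep_only_longest(phrases):
--     ret = []
--     for phrase in sorted(phrases, key=lambda x : len(x), reverse=True):
--         if(any(phrase in t for t in ret)):
--             continue
--         else:
--             ret.append(phrase)
--     return ret
-- ===== SOURCE B (Python) =====
-- def keep_only_longest(phrases):
--     ordered = sorted(phrases, key=len, reverse=True)
--     distinct = set(phrases)
--     seen = set()
--     out = []
--     for p in ordered:
--         if p not in seen and not any(len(q) > len(p) and p in q for q in distinct):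
--             seen.add(p)
--             out.append(p)
--     return out
-- ===== Notes on version B (the rewrite author's own statement) =====
-- stated objective: alternative
-- what changed: Replaces A's substring test against the growing kept-list accumulator by a stateless per-phrase criterion (keep a phrase iff not seen before and not a substring of any strictly longer distinct input phrase), with a seen set for duplicate suppression.
import Mathlib
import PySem

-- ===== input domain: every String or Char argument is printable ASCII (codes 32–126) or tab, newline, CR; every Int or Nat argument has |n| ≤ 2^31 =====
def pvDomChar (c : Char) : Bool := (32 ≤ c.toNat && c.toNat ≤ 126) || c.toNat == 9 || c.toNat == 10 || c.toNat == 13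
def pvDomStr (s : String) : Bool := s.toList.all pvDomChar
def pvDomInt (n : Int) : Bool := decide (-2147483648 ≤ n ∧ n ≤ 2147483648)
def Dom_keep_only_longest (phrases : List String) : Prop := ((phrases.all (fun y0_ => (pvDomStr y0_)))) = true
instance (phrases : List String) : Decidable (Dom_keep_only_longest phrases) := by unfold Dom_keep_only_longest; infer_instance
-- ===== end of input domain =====

-- B replaces A's substring test against the growing kept list by a stateless criterion
-- (not seen before, and not a substring of any strictly longer distinct input phrase) with a seen set
-- for duplicates; same result, alternative decomposition.

-- ===== PORT A =====
def keep_only_longest (phrases : List String) : List String :=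
  (PySem.List.sorted phrases (fun x => PySem.Str.len x) true).foldl
    (fun ret phrase =>
      if ret.any (fun t => PySem.Str.isIn phrase t) then ret else ret ++ [phrase]) []

-- ===== PORT B =====
def kolAltStep (distinct : PySem.Set String) (st : PySem.Set String × List String) (p : String) :
    PySem.Set String × List String :=
  if !(PySem.Set.contains st.1 p)
      && !(distinct.any (fun q => decide (PySem.Str.len p < PySem.Str.len q) && PySem.Str.isIn p q))
  then (PySem.Set.add st.1 p, st.2 ++ [p]) else st

def keep_only_longest_alt (phrases : List String) : List String :=
  ((PySem.List.sorted phrases (fun x => PySem.Str.len x) true).foldl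
    (kolAltStep (PySem.Set.ofList phrases))
    (PySem.Set.empty, [])).2

-- ===== PRECONDITION & SPEC =====
def Spec_keep_only_longest (phrases : List String) (out : List String) : Prop := out = keep_only_longest_alt phrases
instance (phrases : List String) (out : List String) : Decidable (Spec_keep_only_longest phrases out) := by unfold Spec_keep_only_longest; infer_instance

-- ===== CLAIM (what is proved, stated in full; the proofs are below) =====
def Claim_equal_keep_only_longest : Prop := ∀ (phrases : List String), Dom_keep_only_longest phrases → Spec_keep_only_longest phrases (keep_only_longest phrases)

-- ===== LEMMAS AND PROOFS =====

lemma kol_isIn_trans (a b c : String) (h1 : PySem.Str.isIn a b = true)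
    (h2 : PySem.Str.isIn b c = true) : PySem.Str.isIn a c = true := by
  rw [PySem.Str.isIn_iff_infix] at h1 h2 ⊢
  exact h1.trans h2

lemma kol_isIn_self (a : String) : PySem.Str.isIn a a = true :=
  (PySem.Str.isIn_iff_infix a a).2 (List.infix_refl _)

lemma kol_len_le_of_isIn (a b : String) (h : PySem.Str.isIn a b = true) :
    PySem.Str.len a ≤ PySem.Str.len b := by
  rw [PySem.Str.isIn_iff_infix] at h
  rw [PySem.Str.len_eq, PySem.Str.len_eq]
  exact_mod_cast h.length_le

lemma kol_eq_of_isIn_len (a b : String) (h : PySem.Str.isIn a b = true)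
    (hl : PySem.Str.len b ≤ PySem.Str.len a) : a = b := by
  have hle := kol_len_le_of_isIn a b h
  rw [PySem.Str.isIn_iff_infix] at h
  rw [PySem.Str.len_eq, PySem.Str.len_eq] at hl hle
  exact String.toList_inj.mp (h.sublist.eq_of_length (by omega))

lemma kol_loop (phrases : List String) (D : PySem.Set String)
    (hD : ∀ q : String, q ∈ D ↔ q ∈ phrases) :
    ∀ (s ret : List String) (S : PySem.Set String),
    s.Pairwise (fun a b => PySem.Str.len b ≤ PySem.Str.len a) →
    (∀ p ∈ s, p ∈ phrases) →
    (∀ q ∈ phrases, q ∈ s ∨ ∃ t ∈ ret, PySem.Str.isIn q t = true) →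
    (∀ t ∈ ret, t ∈ phrases) →
    (∀ t ∈ ret, ∀ p ∈ s, PySem.Str.len p ≤ PySem.Str.len t) →
    (∀ x : String, x ∈ S ↔ x ∈ ret) →
    s.foldl (fun ret phrase =>
        if ret.any (fun t => PySem.Str.isIn phrase t) then ret else ret ++ [phrase]) ret
      = (s.foldl (kolAltStep D) (S, ret)).2 := by
  intro s
  induction s with
  | nil => intro ret S _ _ _ _ _ _; rfl
  | cons p rest ih =>
    intro ret S hpair hsub hcov hretmem hretlen hS
    obtain ⟨hhead, hpair'⟩ := List.pairwise_cons.1 hpair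
    -- the two branch conditions are equivalent
    have hcA : ret.any (fun t => PySem.Str.isIn p t) = true ↔
        (p ∈ S ∨ D.any
          (fun q => decide (PySem.Str.len p < PySem.Str.len q) && PySem.Str.isIn p q) = true) := by
      constructor
      · intro h
        obtain ⟨t, htret, hin⟩ := List.any_eq_true.1 h
        rcases lt_or_ge (PySem.Str.len p) (PySem.Str.len t) with hlt | hge
        · exact Or.inr (List.any_eq_true.2
            ⟨t, (hD t).2 (hretmem t htret),
              by rw [Bool.and_eq_true, decide_eq_true_eq]; exact ⟨hlt, hin⟩⟩)
        · exact Or.inl ((hS p).2 ((kol_eq_of_isIn_len p t hin hge) ▸ htret))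
      · rintro (hmem | hq)
        · exact List.any_eq_true.2 ⟨p, (hS p).1 hmem, kol_isIn_self p⟩
        · obtain ⟨q, hqD, hb⟩ := List.any_eq_true.1 hq
          have hqph := (hD q).1 hqD
          rw [Bool.and_eq_true, decide_eq_true_eq] at hb
          obtain ⟨hlt, hin⟩ := hb
          rcases hcov q hqph with hqs | ⟨t, ht, hqt⟩
          · rcases List.mem_cons.1 hqs with rfl | hqrest
            · exact absurd hlt (lt_irrefl _)
            · exact absurd hlt (not_lt.2 (hhead q hqrest))
          · exact List.any_eq_true.2 ⟨t, ht, kol_isIn_trans p q t hin hqt⟩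
    rw [List.foldl_cons, List.foldl_cons]
    by_cases hA : ret.any (fun t => PySem.Str.isIn p t) = true
    · -- A drops p; B's keep-condition is false
      have hB : (!(PySem.Set.contains S p) && !(D.any
          (fun q => decide (PySem.Str.len p < PySem.Str.len q) && PySem.Str.isIn p q))) = false := by
        rcases hcA.1 hA with hmem | hany
        · rw [(PySem.Set.contains_iff S p).2 hmem, Bool.not_true, Bool.false_and]
        · rw [hany, Bool.not_true, Bool.and_false]
      rw [if_pos hA]
      have hstep : kolAltStep D (S, ret) p = (S, ret) := by
        unfold kolAltStep; rw [hB]; rfl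
      rw [hstep]
      refine ih ret S hpair' (fun r hr => hsub r (List.mem_cons_of_mem _ hr)) ?_ hretmem
        (fun t ht r hr => hretlen t ht r (List.mem_cons_of_mem _ hr)) hS
      intro q hq
      rcases hcov q hq with h1 | h2
      · rcases List.mem_cons.1 h1 with rfl | hqrest
        · exact Or.inr (List.any_eq_true.1 hA)
        · exact Or.inl hqrest
      · exact Or.inr h2
    · -- A keeps p; B's keep-condition is true
      have hnot : ¬(p ∈ S ∨ D.any
          (fun q => decide (PySem.Str.len p < PySem.Str.len q) && PySem.Str.isIn p q) = true) :=
        fun h => hA (hcA.2 h)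
      rw [not_or] at hnot
      obtain ⟨hmem, hany⟩ := hnot
      have hB : (!(PySem.Set.contains S p) && !(D.any
          (fun q => decide (PySem.Str.len p < PySem.Str.len q) && PySem.Str.isIn p q))) = true := by
        have h1 : PySem.Set.contains S p = false := by
          rcases h : PySem.Set.contains S p with _ | _
          · rfl
          · exact absurd ((PySem.Set.contains_iff S p).1 h) hmem
        have h2 : D.any
            (fun q => decide (PySem.Str.len p < PySem.Str.len q) && PySem.Str.isIn p q) = false :=
          Bool.eq_false_iff.2 hany
        rw [h1, h2]; rfl
      rw [if_neg hA]
      have hstep : kolAltStep D (S, ret) p = (S.add p, ret ++ [p]) := by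
        unfold kolAltStep; rw [hB]; rfl
      rw [hstep]
      refine ih (ret ++ [p]) (S.add p) hpair'
        (fun r hr => hsub r (List.mem_cons_of_mem _ hr)) ?_ ?_ ?_ ?_
      · intro q hq
        rcases hcov q hq with h1 | ⟨t, ht, hqt⟩
        · rcases List.mem_cons.1 h1 with rfl | hqrest
          · exact Or.inr ⟨q, List.mem_append_right _ (List.mem_singleton.2 rfl), kol_isIn_self q⟩
          · exact Or.inl hqrest
        · exact Or.inr ⟨t, List.mem_append_left _ ht, hqt⟩
      · intro t ht
        rcases List.mem_append.1 ht with h1 | h1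
        · exact hretmem t h1
        · exact (List.mem_singleton.1 h1) ▸ hsub p (List.mem_cons_self ..)
      · intro t ht r hr
        rcases List.mem_append.1 ht with h1 | h1
        · exact hretlen t h1 r (List.mem_cons_of_mem _ hr)
        · exact (List.mem_singleton.1 h1) ▸ hhead r hr
      · intro x
        rw [PySem.Set.mem_add, List.mem_append, List.mem_singleton, hS x]

-- ===== VERDICT (by name: the statement is the Claim_ definition above) =====
theorem keep_only_longest_spec : Claim_equal_keep_only_longest := by
  intro phrases _
  unfold Spec_keep_only_longest keep_only_longest keep_only_longest_alt
  exact kol_loop phrases (PySem.Set.ofList phrases)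
    (fun q => PySem.Set.mem_ofList ..) _ [] PySem.Set.empty
    (PySem.List.sorted_pairwise_rev ..)
    (fun p hp => (PySem.List.mem_sorted ..).1 hp)
    (fun q hq => Or.inl ((PySem.List.mem_sorted ..).2 hq))
    (fun t ht => absurd ht (List.not_mem_nil))
    (fun t ht => absurd ht (List.not_mem_nil))
    (fun x => by simp [PySem.Set.empty])
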